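-- pv_equiv track=rewrite | github.com/badmonkey7/Cryptopals | Set2/An ECB_CBC detection oracle/AES_CBC_CTF.py | pkcs7padding
-- ===== SOURCE A (Python) =====
-- def pkcs7padding(target,size):
--     tot = len(target)//size
--     record = []
--     if tot :
--         for i in range(tot):
--             record.append(target[i*size:i*size + size])
--     pad = tot*size+size-len(target)
--     if pad != 0:
--         record.append(target[tot*size:]+chr(pad)*pad)
--     else:
--         record.append(chr(size)*size)
--     return ''.join(record)
-- ===== SOURCE B (Python) =====
-- def pkcs7padding(target, size):
--     pad = size - len(target) % size
--     return target + chr(pad) * pad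
-- ===== Notes on version B (the rewrite author's own statement) =====
-- stated objective: simpler
-- what changed: B computes the padding length directly as size - len(target) % size and appends chr(pad)*pad to the unmodified target, removing A's block-slicing loop, the record list and the join; Pre_ additionally excludes pads in the surrogate range 0xD800-0xDFFF, where both Pythons return the same string of lone surrogates but it is not representable as a Lean String.
import Mathlib
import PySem

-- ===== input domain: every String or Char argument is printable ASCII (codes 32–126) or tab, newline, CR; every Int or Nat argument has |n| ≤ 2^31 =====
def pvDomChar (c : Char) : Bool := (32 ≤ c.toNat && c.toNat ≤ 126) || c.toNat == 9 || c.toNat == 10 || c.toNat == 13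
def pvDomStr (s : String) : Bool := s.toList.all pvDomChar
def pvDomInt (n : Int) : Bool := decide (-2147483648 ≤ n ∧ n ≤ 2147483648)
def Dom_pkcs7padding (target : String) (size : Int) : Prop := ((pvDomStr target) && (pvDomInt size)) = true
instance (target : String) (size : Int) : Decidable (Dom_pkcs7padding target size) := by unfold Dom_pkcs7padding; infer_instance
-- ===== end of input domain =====

-- B replaces A's block-slicing loop, record list and join by the direct formula
-- target + chr(size - len % size) * (size - len % size); same return value on Pre_.

-- ===== PORT A =====
-- strings handled as List Char; ''.join(record) = flatten of the collected pieces
def pkcs7padding (target : String) (size : Int) : String :=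
  let t := target.toList
  let tot := PySem.Int.floordiv (t.length : Int) size
  let record : List (List Char) := []
  let record := if tot ≠ 0 then
      (PySem.List.pyRange 0 tot 1).foldl
        (fun acc i => acc ++ [PySem.List.slice t (some (i * size)) (some (i * size + size))]) record
    else record
  let pad := tot * size + size - (t.length : Int)
  let record := if pad ≠ 0 then
      record ++ [PySem.List.slice t (some (tot * size)) none
                   ++ List.replicate pad.toNat (Char.ofNat pad.toNat)]
    else record ++ [List.replicate size.toNat (Char.ofNat size.toNat)]
  String.ofList record.flatten

-- ===== PORT B =====
def pkcs7padding_alt (target : String) (size : Int) : String :=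
  let pad := size - PySem.Int.mod (target.toList.length : Int) size
  String.ofList (target.toList ++ List.replicate pad.toNat (Char.ofNat pad.toNat))

-- ===== PRECONDITION & SPEC =====
-- Pre_ excludes size ≤ 0 and pads ≥ 0x110000, where the Python raises (ZeroDivisionError /
-- ValueError from chr), and additionally pads in the surrogate range 0xD800–0xDFFF, where the
-- Python returns a string of lone surrogates that is not representable as a Lean String.
def Pre_pkcs7padding (target : String) (size : Int) : Prop :=
  0 < size ∧
  size - (target.toList.length : Int) % size ≤ 1114111 ∧
  ¬ (55296 ≤ size - (target.toList.length : Int) % size ∧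
     size - (target.toList.length : Int) % size ≤ 57343)
instance (target : String) (size : Int) : Decidable (Pre_pkcs7padding target size) := by
  unfold Pre_pkcs7padding; infer_instance

def pvWitness_pkcs7padding : String × Int := ("YELLOW SUBMARINE", 20)

def Spec_pkcs7padding (target : String) (size : Int) (out : String) : Prop := out = pkcs7padding_alt target size
instance (target : String) (size : Int) (out : String) : Decidable (Spec_pkcs7padding target size out) := by unfold Spec_pkcs7padding; infer_instance

-- ===== CLAIM (what is proved, stated in full; the proofs are below) =====
def Claim_equal_pkcs7padding : Prop := ∀ (target : String) (size : Int), Dom_pkcs7padding target size → Pre_pkcs7padding target size → Spec_pkcs7padding target size (pkcs7padding target size)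

-- ===== LEMMAS AND PROOFS =====

-- toNat arithmetic for the block bounds
theorem pv_toNat_mul (m k : Nat) : (((m : Nat) : Int) * ((k : Nat) : Int)).toNat = m * k := by
  rw [← Nat.cast_mul, Int.toNat_natCast]

theorem pv_toNat_mul_add (m k : Nat) : (((m : Nat) : Int) * ((k : Nat) : Int) + ((k : Nat) : Int)).toNat = m * k + k := by
  rw [← Nat.cast_mul, ← Nat.cast_add, Int.toNat_natCast]

-- the flatten of A's collected blocks for range(0, m) is the first m*size characters of target
theorem pv_blocks (t : List Char) (s : Int) (hs : 0 < s) (m : Nat) :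
    (((PySem.List.pyRange 0 (m : Int) 1).foldl
        (fun acc i => acc ++ [PySem.List.slice t (some (i * s)) (some (i * s + s))])
        ([] : List (List Char))).flatten)
      = t.take (m * s.toNat) := by
  obtain ⟨k, rfl⟩ := Int.eq_ofNat_of_zero_le hs.le
  induction m with
  | zero => simp
  | succ m ih =>
    have hsplit : PySem.List.pyRange 0 ((m + 1 : Nat) : Int) 1
        = PySem.List.pyRange 0 (m : Int) 1 ++ [(m : Int)] := by
      have h := PySem.List.pyRange_one_succ_right (a := 0) (b := (m : Int)) (by positivity)
      push_cast
      simpa using h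
    rw [hsplit, List.foldl_append]
    simp only [List.foldl_cons, List.foldl_nil, List.flatten_append, ih]
    have h1 : (0 : Int) ≤ (m : Int) * (k : Int) := by positivity
    have h2 : (0 : Int) ≤ (m : Int) * (k : Int) + (k : Int) := by positivity
    rw [PySem.List.slice_toNat t h1 h2, pv_toNat_mul, pv_toNat_mul_add]
    have e2 : m * k + k - m * k = k := by omega
    rw [e2, Int.toNat_natCast, Nat.succ_mul, List.take_add]
    simp

theorem pkcs7padding_eq (target : String) (size : Int) (hs : 0 < size) :
    pkcs7padding target size = pkcs7padding_alt target size := by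
  obtain ⟨k, rfl⟩ := Int.eq_ofNat_of_zero_le hs.le
  unfold pkcs7padding pkcs7padding_alt
  simp only [PySem.Int.mod_eq_emod_of_pos hs, PySem.Int.floordiv_eq_ediv_of_pos hs]
  set t := target.toList with ht
  set L : Int := (t.length : Int) with hL
  have hdm : L / (k : Int) * (k : Int) = L - L % (k : Int) := by
    have h := Int.ediv_add_emod L (k : Int)
    rw [mul_comm] at h
    omega
  have hmlt : L % (k : Int) < (k : Int) := Int.emod_lt_of_pos _ hs
  have hpadpos : L / (k : Int) * (k : Int) + (k : Int) - L ≠ 0 := by omega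
  have htotnn : 0 ≤ L / (k : Int) := Int.ediv_nonneg (by positivity) hs.le
  obtain ⟨m, hm⟩ : ∃ m : Nat, L / (k : Int) = (m : Int) :=
    ⟨(L / (k : Int)).toNat, (Int.toNat_of_nonneg htotnn).symm⟩
  rw [if_pos hpadpos]
  have hrec : (if L / (k : Int) ≠ 0 then
        (PySem.List.pyRange 0 (L / (k : Int)) 1).foldl
          (fun acc i => acc ++ [PySem.List.slice t (some (i * (k : Int))) (some (i * (k : Int) + (k : Int)))])
          ([] : List (List Char))
      else ([] : List (List Char)))
      = (PySem.List.pyRange 0 (L / (k : Int)) 1).foldl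
          (fun acc i => acc ++ [PySem.List.slice t (some (i * (k : Int))) (some (i * (k : Int) + (k : Int)))])
          ([] : List (List Char)) := by
    split_ifs with h
    · rfl
    · rw [not_not.mp h, PySem.List.pyRange_one_eq_nil (le_refl 0)]
      rfl
  rw [hrec, hm, List.flatten_append, pv_blocks t (k : Int) hs m]
  rw [PySem.List.slice_from t (a := (m : Int) * (k : Int)) (by positivity), pv_toNat_mul]
  have hpad : (m : Int) * (k : Int) + (k : Int) - L = (k : Int) - L % (k : Int) := by
    rw [← hm]; omega
  simp only [List.flatten_cons, List.flatten_nil, List.append_nil, ← List.append_assoc,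
    Int.toNat_natCast, List.take_append_drop, hpad]

-- ===== VERDICT (by name: the statement is the Claim_ definition above) =====
theorem pkcs7padding_spec : Claim_equal_pkcs7padding := by
  intro target size _hdom hpre
  exact pkcs7padding_eq target size hpre.1
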